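-- pv_equiv track=rewrite | github.com/tox123/more_math.py | docs/math.py | substrnum
-- ===== SOURCE A (Python) =====
-- def substrnum(string , number):
--     len_ = len(string)-1
--     newstring = ''
--     for x in range (0, len_):
--         newstring = newstring + string[x]
--         if x == len_ - number:
--             return (newstring)
--         else:
--             pass
-- ===== SOURCE B (Python) =====
-- def substrnum(string, number):
--     t = len(string) - 1 - number
--     if 0 <= t <= len(string) - 2:
--         return string[:t + 1]
--     return None
-- ===== Notes on version B (the rewrite author's own statement) =====
-- stated objective: faster
-- what changed: A builds the prefix character by character in a Python-level loop with an early return; B computes the cut index t = len(string)-1-number in closed form and returns one slice string[:t+1] when 0 <= t <= len(string)-2, else None (one C-level slice instead of O(n) Python iterations and string concatenations).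
import Mathlib
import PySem

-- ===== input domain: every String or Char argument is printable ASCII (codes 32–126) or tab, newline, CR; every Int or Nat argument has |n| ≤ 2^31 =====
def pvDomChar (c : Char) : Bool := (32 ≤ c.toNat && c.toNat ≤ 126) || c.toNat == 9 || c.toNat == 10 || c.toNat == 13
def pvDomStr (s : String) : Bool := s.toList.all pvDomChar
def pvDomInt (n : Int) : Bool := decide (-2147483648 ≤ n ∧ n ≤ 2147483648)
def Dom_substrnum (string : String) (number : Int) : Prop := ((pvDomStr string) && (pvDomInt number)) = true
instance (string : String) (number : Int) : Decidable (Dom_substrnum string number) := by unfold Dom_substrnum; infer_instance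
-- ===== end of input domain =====

-- B replaces A's char-by-char accumulation loop with index arithmetic and one slice (objective: replace the loop by index arithmetic and one slice; measured faster).

-- ===== PORT A =====
-- the for-loop with early return; string[x] is always in range here (0 ≤ x < len_ < len),
-- so the `.getD []` branch for the unreachable IndexError is never taken
def substrnumLoop (s : List Char) (len_ number : Int) (acc : List Char) : List Int → Option (List Char)
  | [] => none
  | x :: rest =>
    let acc' := acc ++ ((PySem.List.pyGet? s x).map (fun c => [c])).getD []
    if x = len_ - number then some acc' else substrnumLoop s len_ number acc' rest

def substrnum (string : String) (number : Int) : Option String :=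
  let s := string.toList
  let len_ : Int := (s.length : Int) - 1
  (substrnumLoop s len_ number [] (PySem.List.pyRange 0 len_ 1)).map String.ofList

-- ===== PORT B =====
def substrnum_alt (string : String) (number : Int) : Option String :=
  let s := string.toList
  let t : Int := (s.length : Int) - 1 - number
  if 0 ≤ t ∧ t ≤ (s.length : Int) - 2 then
    some (String.ofList (PySem.List.slice s none (some (t + 1))))
  else none

-- ===== PRECONDITION & SPEC =====
def Spec_substrnum (string : String) (number : Int) (out : Option String) : Prop := out = substrnum_alt string number
instance (string : String) (number : Int) (out : Option String) : Decidable (Spec_substrnum string number out) := by unfold Spec_substrnum; infer_instance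

-- ===== CLAIM (what is proved, stated in full; the proofs are below) =====
def Claim_equal_substrnum : Prop := ∀ (string : String) (number : Int), Dom_substrnum string number → Spec_substrnum string number (substrnum string number)

-- ===== LEMMAS AND PROOFS =====

lemma substrnumLoop_eq (s : List Char) (number : Int) (i : Nat) :
    substrnumLoop s ((s.length : Int) - 1) number (s.take i)
        (PySem.List.pyRange (i : Int) ((s.length : Int) - 1) 1) =
      if (i : Int) ≤ (s.length : Int) - 1 - number ∧
          (s.length : Int) - 1 - number ≤ (s.length : Int) - 2 then
        some (s.take ((s.length : Int) - 1 - number + 1).toNat)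
      else none := by
  by_cases hlt : (i : Int) < (s.length : Int) - 1
  · rw [PySem.List.pyRange_one_cons hlt]
    have hi : i < s.length := by omega
    have hget : PySem.List.pyGet? s (i : Int) = some s[i] := by
      rw [PySem.List.pyGet?_natCast]; simp [hi]
    have hacc : s.take i ++ [s[i]] = s.take (i + 1) := by
      rw [List.take_add_one]; simp [hi]
    rw [substrnumLoop]
    simp only [hget, Option.map_some, Option.getD_some, hacc]
    by_cases hx : (i : Int) = (s.length : Int) - 1 - number
    · rw [if_pos hx, if_pos (by constructor <;> omega)]
      congr 1
      congr 1
      omega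
    · rw [if_neg hx]
      have hrec := substrnumLoop_eq s number (i + 1)
      have hcast : ((i + 1 : Nat) : Int) = (i : Int) + 1 := by push_cast; ring
      rw [hcast] at hrec
      rw [hrec]
      by_cases hc : (i : Int) + 1 ≤ (s.length : Int) - 1 - number ∧
          (s.length : Int) - 1 - number ≤ (s.length : Int) - 2
      · rw [if_pos hc, if_pos (by omega)]
      · rw [if_neg hc, if_neg (by omega)]
  · rw [PySem.List.pyRange_one_eq_nil (by omega)]
    rw [substrnumLoop, if_neg (by omega)]
termination_by (s.length - i)
decreasing_by omega

theorem substrnum_spec : Claim_equal_substrnum := by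
  intro string number _
  show _ = _
  simp only [substrnum, substrnum_alt]
  set s := string.toList with hs
  have h0 := substrnumLoop_eq s number 0
  simp only [Nat.cast_zero, List.take_zero] at h0
  rw [h0]
  by_cases hc : (0 : Int) ≤ (s.length : Int) - 1 - number ∧
      (s.length : Int) - 1 - number ≤ (s.length : Int) - 2
  · rw [if_pos (by omega), if_pos hc]
    rw [PySem.List.slice_to s (by omega : (0:Int) ≤ (s.length : Int) - 1 - number + 1)]
    simp
  · rw [if_neg (by omega), if_neg hc]
    simp
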